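-- pv_equiv track=rewrite | github.com/Afeks214/WQ---MP-Research | src/weightiz/module3/window_registry.py | resolve_window_index
-- ===== SOURCE A (Python) =====
-- WINDOWS: tuple[int, ...] = (5, 15, 30, 60)
--
-- def normalize_structural_windows(
--     structural_windows: tuple[int, ...] | list[int],
--     *,
--     fallback: tuple[int, ...] = WINDOWS,
-- ) -> tuple[int, ...]:
--     src = tuple(int(x) for x in structural_windows)
--     if len(src) == 0:
--         src = tuple(int(x) for x in fallback)
--     out: list[int] = []
--     seen: set[int] = set()
--     for w in src:
--         if w <= 0:
--             raise RuntimeError(f"Invalid structural window: {w}")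
--         if w in seen:
--             continue
--         seen.add(w)
--         out.append(int(w))
--     if not out:
--         raise RuntimeError("structural_windows must be non-empty")
--     return tuple(out)
--
-- def build_window_index_map(structural_windows: tuple[int, ...] | list[int]) -> dict[int, int]:
--     wins = normalize_structural_windows(structural_windows)
--     return {int(w): int(i) for i, w in enumerate(wins)}
--
-- def resolve_window_index(selected_window: int, structural_windows: tuple[int, ...] | list[int]) -> int:
--     idx_map = build_window_index_map(structural_windows)
--     sw = int(selected_window)
--     if sw not in idx_map:
--         raise RuntimeError(
--             f"selected_window={sw} is not present in structural_windows={tuple(int(x) for x in structural_windows)}"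
--         )
--     return int(idx_map[sw])
-- ===== SOURCE B (Python) =====
-- def resolve_window_index(selected_window, structural_windows):
--     # One pass: maintain position and first-match index directly; no dict is built.
--     src = tuple(int(x) for x in structural_windows)
--     if not src:
--         src = (5, 15, 30, 60)
--     sw = int(selected_window)
--     seen = set()
--     pos = 0
--     found = None
--     for w in src:
--         if w <= 0:
--             raise RuntimeError(f"Invalid structural window: {w}")
--         if w in seen:
--             continue
--         seen.add(w)
--         if w == sw and found is None:
--             found = pos
--         pos += 1
--     if pos == 0:
--         raise RuntimeError("structural_windows must be non-empty")
--     if found is None: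
--         raise RuntimeError(
--             f"selected_window={sw} is not present in structural_windows={tuple(int(x) for x in structural_windows)}"
--         )
--     return found
-- ===== Notes on version B (the rewrite author's own statement) =====
-- stated objective: simpler
-- what changed: Replaces the normalize-then-dict-comprehension-then-lookup pipeline (three helpers, an intermediate list and a dict) by a single loop that tracks the dedup position and the first-match index directly, so no index map is ever built.
import Mathlib
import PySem

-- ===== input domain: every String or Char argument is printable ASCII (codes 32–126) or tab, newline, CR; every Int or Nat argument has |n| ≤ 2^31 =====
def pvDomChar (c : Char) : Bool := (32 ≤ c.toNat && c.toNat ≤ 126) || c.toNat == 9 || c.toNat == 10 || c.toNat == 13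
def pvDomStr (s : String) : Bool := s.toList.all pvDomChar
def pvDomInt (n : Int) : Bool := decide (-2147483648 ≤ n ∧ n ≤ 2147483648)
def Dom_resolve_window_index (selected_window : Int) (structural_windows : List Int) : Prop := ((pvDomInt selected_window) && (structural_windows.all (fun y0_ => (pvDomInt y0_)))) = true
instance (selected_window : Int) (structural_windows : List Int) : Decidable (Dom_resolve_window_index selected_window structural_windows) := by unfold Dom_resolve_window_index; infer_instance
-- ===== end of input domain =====

-- B replaces A's normalize/dict-comprehension/lookup pipeline by a single loop tracking
-- position and first-match index directly (objective: simpler); equal on Pre_ (A returns there).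


-- ===== PORT A =====
-- normalize_structural_windows: loop appending unseen positive windows; none = RuntimeError
def pvNormA : List Int → List Int → PySem.Set Int → Option (List Int)
  | [], out, _ => some out
  | w :: rest, out, seen =>
    if w ≤ 0 then none
    else if PySem.Set.contains seen w then pvNormA rest out seen
    else pvNormA rest (out ++ [w]) (PySem.Set.add seen w)

-- build_window_index_map: {w: i for i, w in enumerate(wins)}
def pvBuildMapA (wins : List Int) : PySem.Dict Int Int :=
  (PySem.List.enumerate wins).foldl (fun d p => d.insert p.2 p.1) PySem.Dict.empty

def resolve_window_index (selected_window : Int) (structural_windows : List Int) : Int :=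
  let src := if structural_windows = [] then [5, 15, 30, 60] else structural_windows
  match pvNormA src [] PySem.Set.empty with
  | none => 0  -- Python raises RuntimeError (invalid window): outside Pre_
  | some out =>
    if out = [] then 0  -- Python raises RuntimeError (non-empty): outside Pre_
    else
      match (pvBuildMapA out).get? selected_window with
      | none => 0  -- Python raises RuntimeError (not present): outside Pre_
      | some i => i

-- ===== PORT B =====
-- single pass: seen-set, dedup position, first-match index; none = RuntimeError (invalid window)
def pvLoopB (sw : Int) : List Int → PySem.Set Int → Int → Option Int → Option (Int × Option Int)
  | [], _, pos, found => some (pos, found)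
  | w :: rest, seen, pos, found =>
    if w ≤ 0 then none
    else if PySem.Set.contains seen w then pvLoopB sw rest seen pos found
    else pvLoopB sw rest (PySem.Set.add seen w) (pos + 1)
        (if w = sw ∧ found = none then some pos else found)

def resolve_window_index_alt (selected_window : Int) (structural_windows : List Int) : Int :=
  let src := if structural_windows = [] then [5, 15, 30, 60] else structural_windows
  match pvLoopB selected_window src PySem.Set.empty 0 none with
  | none => 0  -- Python raises RuntimeError (invalid window): outside Pre_
  | some (pos, found) =>
    if pos = 0 then 0  -- Python raises RuntimeError (non-empty): outside Pre_
    else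
      match found with
      | none => 0  -- Python raises RuntimeError (not present): outside Pre_
      | some i => i

-- ===== PRECONDITION & SPEC =====
-- Pre_ is exactly where the Python A returns normally: every effective window positive and the
-- selected window present (A raises RuntimeError otherwise).
def Pre_resolve_window_index (selected_window : Int) (structural_windows : List Int) : Prop :=
  (∀ w ∈ (if structural_windows = [] then [5, 15, 30, 60] else structural_windows), 0 < w) ∧
  selected_window ∈ (if structural_windows = [] then [5, 15, 30, 60] else structural_windows)
instance (selected_window : Int) (structural_windows : List Int) : Decidable (Pre_resolve_window_index selected_window structural_windows) := by unfold Pre_resolve_window_index; infer_instance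

def pvWitness_resolve_window_index : Int × List Int := (15, [10, 15, 10, 30])

def Spec_resolve_window_index (selected_window : Int) (structural_windows : List Int) (out : Int) : Prop := out = resolve_window_index_alt selected_window structural_windows
instance (selected_window : Int) (structural_windows : List Int) (out : Int) : Decidable (Spec_resolve_window_index selected_window structural_windows out) := by unfold Spec_resolve_window_index; infer_instance

-- ===== CLAIM (what is proved, stated in full; the proofs are below) =====
def Claim_equal_resolve_window_index : Prop := ∀ (selected_window : Int) (structural_windows : List Int), Dom_resolve_window_index selected_window structural_windows → Pre_resolve_window_index selected_window structural_windows → Spec_resolve_window_index selected_window structural_windows (resolve_window_index selected_window structural_windows)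

-- ===== LEMMAS AND PROOFS =====

-- first index (from s) of sw in a list, as an Int-valued option
def pvIdx (sw : Int) : List Int → Int → Option Int
  | [], _ => none
  | w :: r, s => if w = sw then some s else pvIdx sw r (s + 1)

lemma pvIdx_append (sw w : Int) : ∀ (out : List Int) (s : Int),
    pvIdx sw (out ++ [w]) s =
      match pvIdx sw out s with
      | some i => some i
      | none => if w = sw then some (s + out.length) else none := by
  intro out
  induction out with
  | nil => intro s; simp [pvIdx]
  | cons x r ih =>
    intro s
    by_cases hx : x = sw <;> simp [pvIdx, hx, ih (s + 1)] <;> ring_nf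

lemma pvIdx_isSome_mem (sw : Int) : ∀ (l : List Int) (s i : Int),
    pvIdx sw l s = some i → sw ∈ l := by
  intro l
  induction l with
  | nil => intro s i h; simp [pvIdx] at h
  | cons x r ih =>
    intro s i h
    by_cases hx : x = sw
    · simp [hx]
    · simp only [pvIdx, if_neg hx] at h
      exact List.mem_cons_of_mem _ (ih (s + 1) i h)

-- the accumulated seen set IS the accumulated out list; B's state mirrors A's
lemma loop_agree (sw : Int) : ∀ (src out : List Int),
    pvLoopB sw src out (out.length : Int) (pvIdx sw out 0) =
      (pvNormA src out out).map (fun out' => ((out'.length : Int), pvIdx sw out' 0)) := by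
  intro src
  induction src with
  | nil => intro out; simp [pvLoopB, pvNormA]
  | cons w rest ih =>
    intro out
    by_cases h0 : w ≤ 0
    · simp [pvLoopB, pvNormA, h0]
    · by_cases hc : PySem.Set.contains out w
      · have hmem : w ∈ out := by simpa [PySem.Set.contains] using hc
        simp [pvLoopB, pvNormA, h0, hmem, ih out]
      · have hmem : w ∉ out := by simpa [PySem.Set.contains] using hc
        have hadd : PySem.Set.add out w = out ++ [w] := by
          simp [PySem.Set.add, PySem.Set.contains, hmem]
        have hidx : pvIdx sw (out ++ [w]) 0 =
            (if w = sw ∧ pvIdx sw out 0 = none then some (out.length : Int)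
             else pvIdx sw out 0) := by
          rw [pvIdx_append]
          rcases hfo : pvIdx sw out 0 with _ | i <;> by_cases hw : w = sw <;>
            simp [hfo, hw]
        have hrec := ih (out ++ [w])
        simp only [pvLoopB, pvNormA, if_neg h0, hadd]
        rw [if_neg hc, if_neg hc, ← hidx]
        simpa using hrec

-- out' stays duplicate-free
lemma norm_nodup : ∀ (src out : List Int) (out' : List Int), out.Nodup →
    pvNormA src out out = some out' → out'.Nodup := by
  intro src
  induction src with
  | nil => intro out out' hnd h; simp [pvNormA] at h; simpa [← h] using hnd
  | cons w rest ih =>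
    intro out out' hnd h
    by_cases h0 : w ≤ 0
    · simp [pvNormA, h0] at h
    · by_cases hc : PySem.Set.contains out w
      · have hmem : w ∈ out := by simpa [PySem.Set.contains] using hc
        simp only [pvNormA, if_neg h0] at h
        rw [if_pos hc] at h
        exact ih out out' hnd h
      · have hmem : w ∉ out := by simpa [PySem.Set.contains] using hc
        have hadd : PySem.Set.add out w = out ++ [w] := by
          simp [PySem.Set.add, PySem.Set.contains, hmem]
        simp only [pvNormA, if_neg h0, hadd] at h
        rw [if_neg hc] at h
        exact ih (out ++ [w]) out'
          (by
            rw [List.nodup_append]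
            exact ⟨hnd, List.nodup_singleton w,
              by
                intro a ha b hb
                rw [List.mem_singleton] at hb
                subst hb
                exact fun heq => hmem (heq ▸ ha)⟩) h


-- dict lookup over enumerate = first-index search (keys distinct, dict fresh)
lemma dict_lookup (sw : Int) : ∀ (out : List Int) (s : Int) (d : PySem.Dict Int Int),
    out.Nodup → (∀ w ∈ out, d.contains w = false) →
    ((PySem.List.enumerate out s).foldl (fun d p => d.insert p.2 p.1) d).get? sw =
      match pvIdx sw out s with
      | some i => some i
      | none => d.get? sw := by
  intro out
  induction out with
  | nil => intro s d _ _; simp [PySem.List.enumerate, pvIdx]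
  | cons w rest ih =>
    intro s d hnd hfresh
    have hwr : w ∉ rest := (List.nodup_cons.mp hnd).1
    have hrest : rest.Nodup := (List.nodup_cons.mp hnd).2
    rw [PySem.List.enumerate_cons]
    simp only [List.foldl_cons]
    rw [ih (s + 1) (d.insert w s) hrest ?fresh]
    · by_cases hw : w = sw
      · rcases hfr : pvIdx sw rest (s + 1) with _ | i
        · simp [pvIdx, hw, hfr, PySem.Dict.get?_insert_self]
        · exact absurd (hw ▸ pvIdx_isSome_mem sw rest (s + 1) i hfr) hwr
      · rcases hfr : pvIdx sw rest (s + 1) with _ | i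
        · have hne : (d.insert w s).get? sw = d.get? sw :=
            PySem.Dict.get?_insert_of_ne _ _ (fun h => hw h.symm)
          simp [pvIdx, hw, hfr, hne]
        · simp [pvIdx, hw, hfr]
    case fresh =>
      intro u hu
      rw [PySem.Dict.contains_insert]
      have h1 : (u == w) = false := by
        simp only [beq_eq_false_iff_ne]
        intro h; exact hwr (h ▸ hu)
      simp [h1, hfresh u (List.mem_cons_of_mem _ hu)]

lemma ports_agree (sw : Int) (ws : List Int) :
    resolve_window_index sw ws = resolve_window_index_alt sw ws := by
  unfold resolve_window_index resolve_window_index_alt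
  set src := if ws = [] then [5, 15, 30, 60] else ws with hsrc
  have hloop := loop_agree sw src []
  simp only [List.length_nil, Nat.cast_zero, pvIdx] at hloop
  simp only [PySem.Set.empty]
  rcases hA : pvNormA src [] [] with _ | out'
  · rw [hA] at hloop
    simp only [Option.map_none] at hloop
    rw [hloop]
  · rw [hA] at hloop
    simp only [Option.map_some] at hloop
    have hnd : out'.Nodup := norm_nodup src [] out' (by simp) hA
    have hdict := dict_lookup sw out' 0 PySem.Dict.empty hnd
      (by intro w _; simp [PySem.Dict.contains_empty])
    rw [hloop]
    by_cases hout : out' = []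
    · simp [hout]
    · have hlen : ¬ ((out'.length : Int) = 0) := by
        simpa [List.length_eq_zero_iff] using hout
      rcases hidx : pvIdx sw out' 0 with _ | i <;>
        simp [pvBuildMapA, hdict, hidx, hout, hlen, PySem.Dict.get?_empty]

-- ===== VERDICT (by name: the statement is the Claim_ definition above) =====
theorem resolve_window_index_spec : Claim_equal_resolve_window_index := by
  intro sw ws _ _
  unfold Spec_resolve_window_index
  exact ports_agree sw ws
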